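-- pv_equiv track=rewrite | github.com/projetospyton2025/DiaDeSorteConferidor | app.py | normalizar_mes
-- ===== SOURCE A (Python) =====
-- MESES = [
--     "JANEIRO", "FEVEREIRO", "MARÇO", "ABRIL", "MAIO", "JUNHO",
--     "JULHO", "AGOSTO", "SETEMBRO", "OUTUBRO", "NOVEMBRO", "DEZEMBRO"
-- ]
--
-- def normalizar_mes(mes_abreviado):
--     """Converte mês abreviado para o formato completo"""
--     meses_map = {
--         "JAN": "JANEIRO",
--         "FEV": "FEVEREIRO",
--         "MAR": "MARÇO",
--         "ABR": "ABRIL",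
--         "MAI": "MAIO",
--         "JUN": "JUNHO",
--         "JUL": "JULHO",
--         "AGO": "AGOSTO",
--         "SET": "SETEMBRO",
--         "OUT": "OUTUBRO",
--         "NOV": "NOVEMBRO",
--         "DEZ": "DEZEMBRO"
--     }
--
--     if not mes_abreviado:
--         return None
--
--     mes_upper = mes_abreviado.upper()
--
--     # Se já for o nome completo
--     if mes_upper in [m.upper() for m in MESES]:
--         return mes_upper
--
--     # Se for abreviado
--     if mes_upper in meses_map:
--         return meses_map[mes_upper]
--
--     # Verifica se é uma abreviação de 3 letras para qualquer mês
--     for abrev, completo in meses_map.items():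
--         if completo.upper().startswith(mes_upper):
--             return completo
--
--     return mes_upper  # Retorna o que foi fornecido se não encontrar correspondência
-- ===== SOURCE B (Python) =====
-- MESES = [
--     "JANEIRO", "FEVEREIRO", "MARÇO", "ABRIL", "MAIO", "JUNHO",
--     "JULHO", "AGOSTO", "SETEMBRO", "OUTUBRO", "NOVEMBRO", "DEZEMBRO"
-- ]
--
-- def normalizar_mes(mes_abreviado):
--     """Converte mês abreviado para o formato completo"""
--     if not mes_abreviado:
--         return None
--     mes_upper = mes_abreviado.upper()
--     for mes in MESES:
--         if mes.startswith(mes_upper):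
--             return mes
--     return mes_upper
-- ===== Notes on version B (the rewrite author's own statement) =====
-- stated objective: simpler
-- what changed: Drops the meses_map dict and both membership checks; B does one prefix scan over MESES (first full month name starting with the uppercased input, else the uppercased input), since every abbreviation and full name is a prefix of exactly its own month in first-match order.
import Mathlib
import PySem

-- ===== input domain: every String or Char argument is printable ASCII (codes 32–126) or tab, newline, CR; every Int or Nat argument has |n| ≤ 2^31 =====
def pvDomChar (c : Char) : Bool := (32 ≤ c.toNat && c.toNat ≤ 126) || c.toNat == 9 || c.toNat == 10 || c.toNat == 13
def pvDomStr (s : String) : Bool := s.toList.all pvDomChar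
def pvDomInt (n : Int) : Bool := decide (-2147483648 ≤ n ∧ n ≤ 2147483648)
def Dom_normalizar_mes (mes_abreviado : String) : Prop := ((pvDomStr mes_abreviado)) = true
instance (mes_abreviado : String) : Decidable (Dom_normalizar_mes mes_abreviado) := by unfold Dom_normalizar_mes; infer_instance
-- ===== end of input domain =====

-- B replaces A's dict + two membership checks with a single first-prefix-match scan over MESES (simpler, same result).

-- module-level constant MESES (shared context of both versions)
def pvMESES : List String := ["JANEIRO", "FEVEREIRO", "MARÇO", "ABRIL", "MAIO", "JUNHO",
  "JULHO", "AGOSTO", "SETEMBRO", "OUTUBRO", "NOVEMBRO", "DEZEMBRO"]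

-- ===== PORT A =====
-- A's local dict meses_map
def pvMesesMap : PySem.Dict String String := PySem.Dict.ofList
  [("JAN", "JANEIRO"), ("FEV", "FEVEREIRO"), ("MAR", "MARÇO"), ("ABR", "ABRIL"),
   ("MAI", "MAIO"), ("JUN", "JUNHO"), ("JUL", "JULHO"), ("AGO", "AGOSTO"),
   ("SET", "SETEMBRO"), ("OUT", "OUTUBRO"), ("NOV", "NOVEMBRO"), ("DEZ", "DEZEMBRO")]

def normalizar_mes (mes_abreviado : String) : Option String :=
  if mes_abreviado = "" then none
  else
    if ((pvMESES.map (fun m => PySem.Str.upper m)).contains (PySem.Str.upper mes_abreviado)) then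
      some (PySem.Str.upper mes_abreviado)
    else if pvMesesMap.contains (PySem.Str.upper mes_abreviado) then
      pvMesesMap.get? (PySem.Str.upper mes_abreviado)
    else
      match pvMesesMap.items.find? (fun p => PySem.Str.startswith (PySem.Str.upper p.2) (PySem.Str.upper mes_abreviado)) with
      | some p => some p.2
      | none => some (PySem.Str.upper mes_abreviado)

-- ===== PORT B =====
def normalizar_mes_alt (mes_abreviado : String) : Option String :=
  if mes_abreviado = "" then none
  else
    match pvMESES.find? (fun mes => PySem.Str.startswith mes (PySem.Str.upper mes_abreviado)) with
    | some mes => some mes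
    | none => some (PySem.Str.upper mes_abreviado)

-- ===== PRECONDITION & SPEC =====
def Spec_normalizar_mes (mes_abreviado : String) (out : Option String) : Prop := out = normalizar_mes_alt mes_abreviado
instance (mes_abreviado : String) (out : Option String) : Decidable (Spec_normalizar_mes mes_abreviado out) := by unfold Spec_normalizar_mes; infer_instance

-- ===== CLAIM (what is proved, stated in full; the proofs are below) =====
def Claim_equal_normalizar_mes : Prop := ∀ (mes_abreviado : String), Dom_normalizar_mes mes_abreviado → Spec_normalizar_mes mes_abreviado (normalizar_mes mes_abreviado)

-- ===== LEMMAS AND PROOFS =====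

-- the two bodies agree for EVERY possible value u of mes_abreviado.upper()
lemma pv_body_eq (u : String) :
    (if ((pvMESES.map (fun m => PySem.Str.upper m)).contains u) then some u
     else if pvMesesMap.contains u then pvMesesMap.get? u
     else
       match pvMesesMap.items.find? (fun p => PySem.Str.startswith (PySem.Str.upper p.2) u) with
       | some p => some p.2
       | none => some u)
    =
    (match pvMESES.find? (fun mes => PySem.Str.startswith mes u) with
     | some mes => some mes
     | none => some u) := by
  by_cases h1 : ((pvMESES.map (fun m => PySem.Str.upper m)).contains u) = true
  · have hm : u ∈ pvMESES.map (fun m => PySem.Str.upper m) := by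
      simpa using h1
    fin_cases hm <;> decide
  · rw [if_neg h1]
    by_cases h2 : pvMesesMap.contains u = true
    · have hit : pvMesesMap.items = [("JAN", "JANEIRO"), ("FEV", "FEVEREIRO"), ("MAR", "MARÇO"),
              ("ABR", "ABRIL"), ("MAI", "MAIO"), ("JUN", "JUNHO"), ("JUL", "JULHO"),
              ("AGO", "AGOSTO"), ("SET", "SETEMBRO"), ("OUT", "OUTUBRO"),
              ("NOV", "NOVEMBRO"), ("DEZ", "DEZEMBRO")] := rfl
      rcases (by simpa [PySem.Dict.contains, hit] using h2 :
          "JAN" = u ∨ "FEV" = u ∨ "MAR" = u ∨ "ABR" = u ∨ "MAI" = u ∨ "JUN" = u ∨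
          "JUL" = u ∨ "AGO" = u ∨ "SET" = u ∨ "OUT" = u ∨ "NOV" = u ∨ "DEZ" = u) with
          h | h | h | h | h | h | h | h | h | h | h | h <;> subst h <;> decide
    · rw [if_neg h2]
      show (match List.find? _ [("JAN", "JANEIRO"), ("FEV", "FEVEREIRO"), ("MAR", "MARÇO"),
              ("ABR", "ABRIL"), ("MAI", "MAIO"), ("JUN", "JUNHO"), ("JUL", "JULHO"),
              ("AGO", "AGOSTO"), ("SET", "SETEMBRO"), ("OUT", "OUTUBRO"),
              ("NOV", "NOVEMBRO"), ("DEZ", "DEZEMBRO")] with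
            | some p => some p.2 | none => some u) = _
      simp only [List.find?_cons, List.find?_nil, pvMESES]
      rw [show PySem.Str.upper "JANEIRO" = "JANEIRO" from rfl]
      rw [show PySem.Str.upper "FEVEREIRO" = "FEVEREIRO" from rfl]
      rw [show PySem.Str.upper "MARÇO" = "MARÇO" from rfl]
      rw [show PySem.Str.upper "ABRIL" = "ABRIL" from rfl]
      rw [show PySem.Str.upper "MAIO" = "MAIO" from rfl]
      rw [show PySem.Str.upper "JUNHO" = "JUNHO" from rfl]
      rw [show PySem.Str.upper "JULHO" = "JULHO" from rfl]
      rw [show PySem.Str.upper "AGOSTO" = "AGOSTO" from rfl]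
      rw [show PySem.Str.upper "SETEMBRO" = "SETEMBRO" from rfl]
      rw [show PySem.Str.upper "OUTUBRO" = "OUTUBRO" from rfl]
      rw [show PySem.Str.upper "NOVEMBRO" = "NOVEMBRO" from rfl]
      rw [show PySem.Str.upper "DEZEMBRO" = "DEZEMBRO" from rfl]
      cases PySem.Str.startswith "JANEIRO" u <;> try rfl
      cases PySem.Str.startswith "FEVEREIRO" u <;> try rfl
      cases PySem.Str.startswith "MARÇO" u <;> try rfl
      cases PySem.Str.startswith "ABRIL" u <;> try rfl
      cases PySem.Str.startswith "MAIO" u <;> try rfl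
      cases PySem.Str.startswith "JUNHO" u <;> try rfl
      cases PySem.Str.startswith "JULHO" u <;> try rfl
      cases PySem.Str.startswith "AGOSTO" u <;> try rfl
      cases PySem.Str.startswith "SETEMBRO" u <;> try rfl
      cases PySem.Str.startswith "OUTUBRO" u <;> try rfl
      cases PySem.Str.startswith "NOVEMBRO" u <;> try rfl
      cases PySem.Str.startswith "DEZEMBRO" u <;> try rfl

-- ===== VERDICT (by name: the statement is the Claim_ definition above) =====
theorem normalizar_mes_spec : Claim_equal_normalizar_mes := by
  intro s _
  unfold Spec_normalizar_mes normalizar_mes normalizar_mes_alt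
  by_cases hs : s = ""
  · simp [hs]
  · rw [if_neg hs, if_neg hs]
    exact pv_body_eq (PySem.Str.upper s)
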